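-- pv_equiv track=rewrite | github.com/JakeWalker23/advent-of-code | day_6/wait_for_it.py | calculate_race_distance
-- ===== SOURCE A (Python) =====
-- def calculate_race_distance(boat_time, winning_distance):
--     winning_strategies = []
--
--     for index in range(int(boat_time)):
--         race_time = int(boat_time)
--         charge = index
--         time_to_race = race_time - charge
--
--         distance_travelled = charge * time_to_race
--
--         if int(distance_travelled) > int(winning_distance):
--             winning_strategies.append(charge)
--
--     return len(winning_strategies)
-- ===== SOURCE B (Python) =====
-- def calculate_race_distance(boat_time, winning_distance):
--     T = int(boat_time)
--     W = int(winning_distance)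
--     if T <= 0:
--         return 0
--     m = T // 2
--     if m * (T - m) <= W:
--         return 0
--     # binary search for the smallest charge c in [0, m] with c * (T - c) > W
--     lo, hi = 0, m
--     while lo < hi:
--         mid = (lo + hi) // 2
--         if mid * (T - mid) > W:
--             hi = mid
--         else:
--             lo = mid + 1
--     # by symmetry c*(T-c) = (T-c)*c, winners are exactly [lo, T - lo] meet [0, T - 1]
--     return min(T - lo, T - 1) - lo + 1
-- ===== Notes on version B (the rewrite author's own statement) =====
-- stated objective: faster
-- what changed: Replaces the linear scan over all charge times by a binary search for the first winning charge on the increasing half of the symmetric distance function, then counts the winning interval in closed form.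
import Mathlib
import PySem

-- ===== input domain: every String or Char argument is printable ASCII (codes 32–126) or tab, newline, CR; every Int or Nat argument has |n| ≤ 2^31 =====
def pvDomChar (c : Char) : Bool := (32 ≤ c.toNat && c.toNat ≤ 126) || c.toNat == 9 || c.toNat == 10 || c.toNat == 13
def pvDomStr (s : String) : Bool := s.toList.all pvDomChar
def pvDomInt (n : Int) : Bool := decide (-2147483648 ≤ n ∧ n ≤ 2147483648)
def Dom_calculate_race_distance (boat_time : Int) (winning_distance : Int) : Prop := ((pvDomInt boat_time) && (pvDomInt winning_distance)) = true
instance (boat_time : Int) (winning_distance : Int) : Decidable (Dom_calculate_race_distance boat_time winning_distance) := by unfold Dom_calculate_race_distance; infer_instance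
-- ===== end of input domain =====

-- B replaces A's linear scan over all charge times by a binary search for the first
-- winning charge on the increasing half of the symmetric distance function (faster).

-- ===== PORT A =====
def calculate_race_distance (boat_time : Int) (winning_distance : Int) : Int :=
  let winning_strategies : List Int :=
    (PySem.List.pyRange 0 boat_time 1).foldl
      (fun acc index =>
        let race_time := boat_time
        let charge := index
        let time_to_race := race_time - charge
        let distance_travelled := charge * time_to_race
        if distance_travelled > winning_distance then acc ++ [charge] else acc)
      []
  (winning_strategies.length : Int)

-- ===== PORT B =====
-- the while loop of Source B: binary search; hi - lo strictly shrinks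
def pvBsearch (T W lo hi : Int) : Int :=
  if h : lo < hi then
    if (PySem.Int.floordiv (lo + hi) 2) * (T - PySem.Int.floordiv (lo + hi) 2) > W then
      pvBsearch T W lo (PySem.Int.floordiv (lo + hi) 2)
    else
      pvBsearch T W (PySem.Int.floordiv (lo + hi) 2 + 1) hi
  else lo
termination_by (hi - lo).toNat
decreasing_by
  · have h1 := PySem.Int.floordiv_two_mid_bounds (le_of_lt h)
    have h2 := (PySem.Int.floordiv_lt_iff_lt_mul (a := lo + hi) (q := hi)
      (show (0:Int) < 2 by norm_num)).mpr (by omega)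
    omega
  · have h1 := PySem.Int.floordiv_two_mid_bounds (le_of_lt h)
    omega

def calculate_race_distance_alt (boat_time : Int) (winning_distance : Int) : Int :=
  let T := boat_time
  let W := winning_distance
  if T ≤ 0 then 0
  else
    let m := PySem.Int.floordiv T 2
    if m * (T - m) ≤ W then 0
    else
      let lo := pvBsearch T W 0 m
      min (T - lo) (T - 1) - lo + 1

-- ===== PRECONDITION & SPEC =====
def Spec_calculate_race_distance (boat_time : Int) (winning_distance : Int) (out : Int) : Prop := out = calculate_race_distance_alt boat_time winning_distance
instance (boat_time : Int) (winning_distance : Int) (out : Int) : Decidable (Spec_calculate_race_distance boat_time winning_distance out) := by unfold Spec_calculate_race_distance; infer_instance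

-- ===== CLAIM (what is proved, stated in full; the proofs are below) =====
def Claim_equal_calculate_race_distance : Prop := ∀ (boat_time : Int) (winning_distance : Int), Dom_calculate_race_distance boat_time winning_distance → Spec_calculate_race_distance boat_time winning_distance (calculate_race_distance boat_time winning_distance)

-- ===== LEMMAS AND PROOFS =====

-- A is a count of the winning charges
theorem pv_A_eq_countP (T W : Int) :
    calculate_race_distance T W =
      ((PySem.List.pyRange 0 T 1).countP (fun c => decide (c * (T - c) > W)) : Int) := by
  unfold calculate_race_distance
  rw [PySem.List.foldl_append_ite_eq_filter]
  simp [List.countP_eq_length_filter]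

-- counting the integers of [0, n) lying in [a, b]
theorem pv_count_interval (n : Nat) (a b : Int) :
    (((PySem.List.pyRange 0 n 1).countP (fun c => decide (a ≤ c ∧ c ≤ b))) : Int) =
      max 0 (min b ((n : Int) - 1) - max a 0 + 1) := by
  induction n with
  | zero =>
    rw [show ((0 : Nat) : Int) = 0 by norm_num, PySem.List.pyRange_one_eq_nil le_rfl]
    simp
  | succ k ih =>
    have h : (0 : Int) ≤ (k : Int) := by positivity
    have hcast : ((k : Int) + 1) = ((k + 1 : Nat) : Int) := by push_cast; ring
    rw [← hcast, PySem.List.pyRange_one_succ_right h, List.countP_append]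
    simp only [List.countP_cons, List.countP_nil]
    by_cases hk : a ≤ (k : Int) ∧ (k : Int) ≤ b
    · simp only [hk, and_self, decide_true]
      push_cast
      omega
    · have hd : (decide (a ≤ (k : Int) ∧ (k : Int) ≤ b)) = false := by simpa using hk
      simp only [hd]
      push_cast
      omega

-- binary-search specification
theorem pv_bsearch_spec (T W : Int) : ∀ lo hi : Int, lo ≤ hi → 2 * hi ≤ T →
    hi * (T - hi) > W →
    lo ≤ pvBsearch T W lo hi ∧ pvBsearch T W lo hi ≤ hi ∧
      (pvBsearch T W lo hi) * (T - pvBsearch T W lo hi) > W ∧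
      (∀ c, lo ≤ c → c < pvBsearch T W lo hi → c * (T - c) ≤ W) := by
  intro lo hi
  induction lo, hi using pvBsearch.induct T W with
  | case1 lo hi h hgt ih =>
    intro _ h2T hhi
    obtain ⟨hb1, hb2⟩ := PySem.Int.floordiv_two_mid_bounds (le_of_lt h)
    rw [pvBsearch, dif_pos h, if_pos hgt]
    obtain ⟨i1, i2, i3, i4⟩ := ih hb1 (by omega) hgt
    exact ⟨i1, by omega, i3, i4⟩
  | case2 lo hi h hle2 ih =>
    intro _ h2T hhi
    obtain ⟨hb1, hb2⟩ := PySem.Int.floordiv_two_mid_bounds (le_of_lt h)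
    have hmlt : PySem.Int.floordiv (lo + hi) 2 < hi :=
      (PySem.Int.floordiv_lt_iff_lt_mul (show (0:Int) < 2 by norm_num)).mpr (by omega)
    rw [pvBsearch, dif_pos h, if_neg hle2]
    obtain ⟨i1, i2, i3, i4⟩ := ih (by omega) h2T hhi
    refine ⟨by omega, i2, i3, ?_⟩
    intro c hc1 hc2
    by_cases hcm : c ≤ PySem.Int.floordiv (lo + hi) 2
    · -- c below the midpoint: distance is monotone up to T/2
      push_neg at hle2
      set mid := PySem.Int.floordiv (lo + hi) 2 with hmid
      have key : mid * (T - mid) - c * (T - c) = (mid - c) * (T - (mid + c)) := by ring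
      nlinarith [mul_nonneg (by omega : (0:Int) ≤ mid - c) (by omega : (0:Int) ≤ T - (mid + c))]
    · exact i4 c (by omega) hc2
  | case3 lo hi h =>
    intro hle _ hhi
    rw [pvBsearch, dif_neg h]
    have heq : lo = hi := le_antisymm hle (not_lt.mp h)
    exact ⟨le_refl _, hle, by simpa [heq] using hhi, by intro c h1 h2; omega⟩

-- main equivalence on every input
theorem pv_main (T W : Int) :
    calculate_race_distance T W = calculate_race_distance_alt T W := by
  rw [pv_A_eq_countP]
  unfold calculate_race_distance_alt
  by_cases hT : T ≤ 0
  · rw [if_pos hT, PySem.List.pyRange_one_eq_nil hT]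
    simp
  · rw [if_neg hT]
    push_neg at hT
    obtain ⟨hm1, hm2⟩ := (PySem.Int.floordiv_eq_iff_of_pos
      (a := T) (b := 2) (q := PySem.Int.floordiv T 2) (by norm_num)).mp rfl
    set m := PySem.Int.floordiv T 2 with hmdef
    by_cases hmW : m * (T - m) ≤ W
    · rw [if_pos hmW]
      have : (PySem.List.pyRange 0 T 1).countP (fun c => decide (c * (T - c) > W)) = 0 := by
        rw [List.countP_eq_zero]
        intro c hc
        rw [PySem.List.mem_pyRange_one] at hc
        simp only [decide_eq_true_eq, gt_iff_lt, not_lt]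
        by_cases hcm : c ≤ m
        · nlinarith [mul_nonneg (by omega : (0:Int) ≤ m - c) (by omega : (0:Int) ≤ T - (m + c))]
        · -- use symmetry c*(T-c) = (T-c)*c and T-c ≤ m
          nlinarith [mul_nonneg (by omega : (0:Int) ≤ m - (T - c)) (by omega : (0:Int) ≤ T - (m + (T - c)))]
      rw [this]; norm_num
    · rw [if_neg hmW]
      push_neg at hmW
      obtain ⟨r1, r2, r3, r4⟩ := pv_bsearch_spec T W 0 m (by omega) (by omega) hmW
      set r := pvBsearch T W 0 m with hrdef
      have hpred : ∀ c ∈ PySem.List.pyRange 0 T 1,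
          (decide (c * (T - c) > W)) = true ↔ (decide (r ≤ c ∧ c ≤ T - r)) = true := by
        intro c hc
        rw [PySem.List.mem_pyRange_one] at hc
        simp only [decide_eq_true_eq, gt_iff_lt]
        constructor
        · intro hw
          constructor
          · by_contra hlt
            exact absurd hw (not_lt.mpr (r4 c (by omega) (by omega)))
          · by_contra hgt
            push_neg at hgt
            have h0 : T - c < r := by omega
            have := r4 (T - c) (by omega) h0
            nlinarith
        · rintro ⟨hc1, hc2⟩
          by_cases hcm : c ≤ m
          · nlinarith [mul_nonneg (by omega : (0:Int) ≤ c - r) (by omega : (0:Int) ≤ T - (c + r))]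
          · have hsym : (T - c) ≤ m := by omega
            have h1 : r ≤ T - c := by omega
            nlinarith [mul_nonneg (by omega : (0:Int) ≤ (T - c) - r) (by omega : (0:Int) ≤ T - ((T - c) + r))]
      rw [List.countP_congr hpred]
      have hTn : T = ((T.toNat : Nat) : Int) := by omega
      have hcnt := pv_count_interval T.toNat r (T - r)
      rw [← hTn] at hcnt
      rw [hcnt]
      show _ = min (T - r) (T - 1) - r + 1
      omega

-- ===== VERDICT (by name: the statement is the Claim_ definition above) =====
theorem calculate_race_distance_spec : Claim_equal_calculate_race_distance := by
  intro boat_time winning_distance _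
  unfold Spec_calculate_race_distance
  exact pv_main boat_time winning_distance
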